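-- pv_equiv track=rewrite | github.com/KimbleKe/AlgorithmsAndCodingChallenges | Algorithms/SearchAlgorithm/TreeGraphSearchAlgorithm/DepthFirstSearch.py | dfs
-- ===== SOURCE A (Python) =====
-- def dfs(graph, start, goal, visited=None):
--   if visited is None:
--     visited = set()
--   if start == goal:
--     return [start]
--   visited.add(start)
--   for neighbor in graph.get(start, []):
--     if neighbor not in visited:
--       path = dfs(graph, neighbor, goal, visited)
--       if path:
--         return [start] + path
--   return None
-- ===== SOURCE B (Python) =====
-- def dfs(graph, start, goal, visited=None):
--     # Iterative DFS with an explicit stack of neighbor iterators (same traversal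
--     # order, same visited mutations, same first-found path as the recursive version).
--     if visited is None:
--         visited = set()
--     if start == goal:
--         return [start]
--     visited.add(start)
--     path = [start]
--     stack = [iter(graph.get(start, []))]
--     while stack:
--         node = next(stack[-1], None)
--         if node is None:
--             stack.pop()
--             path.pop()
--         elif node in visited:
--             continue
--         elif node == goal:
--             return path + [node]
--         else:
--             visited.add(node)
--             path.append(node)
--             stack.append(iter(graph.get(node, [])))
--     return None
-- ===== Notes on version B (the rewrite author's own statement) =====
-- stated objective: alternative
-- what changed: A's recursive DFS is replaced by an iterative DFS driven by an explicit stack of neighbor iterators with the current path maintained as a list; same traversal order, same visited mutations, same first-found path, no Python recursion.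
import Mathlib
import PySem

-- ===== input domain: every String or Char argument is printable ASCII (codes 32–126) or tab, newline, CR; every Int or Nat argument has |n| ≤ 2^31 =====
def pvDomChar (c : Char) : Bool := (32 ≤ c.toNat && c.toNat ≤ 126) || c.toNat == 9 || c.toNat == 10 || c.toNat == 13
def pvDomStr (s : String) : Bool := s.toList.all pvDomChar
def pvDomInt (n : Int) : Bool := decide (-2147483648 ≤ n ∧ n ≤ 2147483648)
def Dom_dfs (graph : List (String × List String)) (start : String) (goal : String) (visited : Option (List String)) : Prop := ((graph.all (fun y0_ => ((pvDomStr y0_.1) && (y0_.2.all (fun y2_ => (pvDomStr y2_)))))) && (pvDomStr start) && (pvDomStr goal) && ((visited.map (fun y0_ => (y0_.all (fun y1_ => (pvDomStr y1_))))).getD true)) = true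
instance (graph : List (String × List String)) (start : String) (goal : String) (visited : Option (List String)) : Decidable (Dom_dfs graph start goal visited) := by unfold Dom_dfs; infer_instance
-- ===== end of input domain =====

-- B replaces A's recursive DFS by an iterative DFS over an explicit stack of pending-neighbor
-- frames (same traversal order, same result); the equivalence proved here is about the RETURN
-- value only (both Pythons also mutate a caller-supplied `visited` set, in the same way).

-- ===== PORT A =====
-- `graph.get(s, [])`
def pvAdj (graph : List (String × List String)) (s : String) : List String :=
  PySem.Dict.getD (PySem.Dict.mk graph) s []

-- all strings occurring in adjacency lists (used only as a termination bound)
def pvUniv (graph : List (String × List String)) : List String := graph.flatMap (·.2)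

-- number of still-unvisited universe entries (used only as a termination measure)
def pvM (graph : List (String × List String)) (v : PySem.Set String) : Nat :=
  ((pvUniv graph).filter (fun x => !(PySem.Set.contains v x))).length

theorem pvAdj_sub (graph : List (String × List String)) (s : String) :
    ∀ x ∈ pvAdj graph s, x ∈ pvUniv graph := by
  intro x hx
  unfold pvAdj at hx
  rw [PySem.Dict.getD_eq_get?_getD] at hx
  rcases h : PySem.Dict.get? (PySem.Dict.mk graph) s with _ | l
  · rw [h] at hx; simp at hx
  · rw [h] at hx
    have hm := PySem.Dict.mem_items_of_get?_eq_some (PySem.Dict.mk graph) h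
    unfold pvUniv
    simp only [List.mem_flatMap]
    exact ⟨(s, l), hm, hx⟩

theorem pvContains_eq_false {v : PySem.Set String} {x : String} (h : x ∉ v) :
    PySem.Set.contains v x = false :=
  Bool.eq_false_iff.mpr (fun hc => h ((PySem.Set.contains_iff v x).mp hc))

theorem pvM_le_of_subset {graph : List (String × List String)} {v w : PySem.Set String}
    (h : ∀ x, x ∈ v → x ∈ w) : pvM graph w ≤ pvM graph v := by
  unfold pvM
  apply List.Sublist.length_le
  apply List.monotone_filter_right
  intro x hx
  simp only [Bool.not_eq_eq_eq_not, Bool.not_true] at *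
  exact pvContains_eq_false (fun hm => by
    rw [(PySem.Set.contains_iff w x).mpr (h x hm)] at hx; exact absurd hx (by simp))

theorem pvM_add_le (graph : List (String × List String)) (v : PySem.Set String) (n : String) :
    pvM graph (PySem.Set.add v n) ≤ pvM graph v :=
  pvM_le_of_subset (fun x hx => (PySem.Set.mem_add v n x).mpr (Or.inl hx))

theorem pvContains_add_eq (v : PySem.Set String) (n x : String) :
    PySem.Set.contains (PySem.Set.add v n) x = (PySem.Set.contains v x || x == n) := by
  by_cases hm : x ∈ PySem.Set.add v n
  · rw [(PySem.Set.contains_iff _ x).mpr hm]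
    rcases (PySem.Set.mem_add v n x).mp hm with h | h
    · rw [(PySem.Set.contains_iff v x).mpr h]; simp
    · subst h; simp
  · rw [pvContains_eq_false hm,
      pvContains_eq_false (fun h => hm ((PySem.Set.mem_add v n x).mpr (Or.inl h)))]
    have h2 : x ≠ n := fun h => hm ((PySem.Set.mem_add v n x).mpr (Or.inr h))
    simp [h2]

theorem pvM_add_lt {graph : List (String × List String)} {v : PySem.Set String} {n : String}
    (hu : n ∈ pvUniv graph) (hv : n ∉ v) :
    pvM graph (PySem.Set.add v n) < pvM graph v := by
  unfold pvM
  have heq : (pvUniv graph).filter (fun x => !(PySem.Set.contains (PySem.Set.add v n) x)) =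
      ((pvUniv graph).filter (fun x => !(PySem.Set.contains v x))).filter (fun x => !(x == n)) := by
    rw [List.filter_filter]
    apply List.filter_congr
    intro x _
    rw [pvContains_add_eq, Bool.not_or, Bool.and_comm]
  rw [heq]
  apply List.length_filter_lt_length_iff_exists.mpr
  refine ⟨n, List.mem_filter.mpr ⟨hu, by rw [pvContains_eq_false hv]; rfl⟩, by simp⟩

mutual
-- the recursive `dfs(graph, start, goal, visited)` of A, visited threaded explicitly;
-- the returned set carries a pvM bound (a totality guard: the set only ever grows)
def dfsRec (graph : List (String × List String)) (start : String) (goal : String)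
    (v : PySem.Set String) :
    {r : Option (List String) × PySem.Set String // pvM graph r.2 ≤ pvM graph v} :=
  if _hg : start = goal then ⟨(some [start], v), le_refl _⟩
  else
    -- visited.add(start); then the for-loop over graph.get(start, [])
    let r := dfsLoop graph start goal (pvAdj graph start) (pvAdj_sub graph start)
      (PySem.Set.add v start)
    ⟨r.val, le_trans r.property (pvM_add_le graph v start)⟩
termination_by (pvM graph (PySem.Set.add v start), 1, 0)
decreasing_by
  exact Prod.Lex.right _ (Prod.Lex.left _ _ (by omega))

-- the `for neighbor in ...` loop body of A, over the remaining neighbors ns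
def dfsLoop (graph : List (String × List String)) (start : String) (goal : String)
    (ns : List String) (h : ∀ x ∈ ns, x ∈ pvUniv graph) (v : PySem.Set String) :
    {r : Option (List String) × PySem.Set String // pvM graph r.2 ≤ pvM graph v} :=
  match ns with
  | [] => ⟨(none, v), le_refl _⟩
  | n :: rest =>
    if hc : PySem.Set.contains v n then
      dfsLoop graph start goal rest (fun x hx => h x (List.mem_cons_of_mem n hx)) v
    else
      let r := dfsRec graph n goal v
      match hr : r.val with
      | (some p, v') =>
        -- `if path:` — an empty list is falsy (dfs in fact never returns an empty list)
        if p = [] then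
          let r2 := dfsLoop graph start goal rest (fun x hx => h x (List.mem_cons_of_mem n hx)) v'
          ⟨r2.val, le_trans r2.property (by have := r.property; rw [hr] at this; exact this)⟩
        else
          ⟨(some (start :: p), v'), by have := r.property; rw [hr] at this; exact this⟩
      | (none, v') =>
        let r2 := dfsLoop graph start goal rest (fun x hx => h x (List.mem_cons_of_mem n hx)) v'
        ⟨r2.val, le_trans r2.property (by have := r.property; rw [hr] at this; exact this)⟩
termination_by (pvM graph v, 0, ns.length)
decreasing_by
  · exact Prod.Lex.right _ (Prod.Lex.right _ (Nat.lt_succ_self _))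
  · apply Prod.Lex.left
    exact pvM_add_lt (h n (List.mem_cons_self)) (fun hm => hc ((PySem.Set.contains_iff v n).mpr hm))
  · have hle : pvM graph v' ≤ pvM graph v := by have := r.property; rw [hr] at this; exact this
    rcases Nat.lt_or_ge (pvM graph v') (pvM graph v) with hlt | hge
    · exact Prod.Lex.left _ _ hlt
    · have heq : pvM graph v' = pvM graph v := Nat.le_antisymm hle hge
      rw [heq]
      exact Prod.Lex.right _ (Prod.Lex.right _ (Nat.lt_succ_self _))
  · have hle : pvM graph v' ≤ pvM graph v := by have := r.property; rw [hr] at this; exact this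
    rcases Nat.lt_or_ge (pvM graph v') (pvM graph v) with hlt | hge
    · exact Prod.Lex.left _ _ hlt
    · have heq : pvM graph v' = pvM graph v := Nat.le_antisymm hle hge
      rw [heq]
      exact Prod.Lex.right _ (Prod.Lex.right _ (Nat.lt_succ_self _))
end

def dfs (graph : List (String × List String)) (start : String) (goal : String)
    (visited : Option (List String)) : Option (List String) :=
  let v0 : PySem.Set String := match visited with
    | none => PySem.Set.empty
    | some l => PySem.Set.ofList l
  (dfsRec graph start goal v0).val.1

-- ===== PORT B =====
-- the while-loop of Source B: `stack` holds the remaining-neighbor list of each frame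
-- (top first; the Python iterator is modelled by its list of not-yet-yielded elements),
-- `path` is the current path in REVERSED order (Python appends at the end, we cons);
-- h is a totality guard (every stacked neighbor is in the universe), stack and path
-- always have the same length so Python's path.pop() is List.tail here
def runB (graph : List (String × List String)) (goal : String)
    (stack : List (List String)) (path : List String) (v : PySem.Set String)
    (h : ∀ f ∈ stack, ∀ x ∈ f, x ∈ pvUniv graph) : Option (List String) :=
  match stack with
  | [] => none
  | [] :: fs =>
      -- iterator exhausted: stack.pop(); path.pop()
      runB graph goal fs path.tail v (fun f hf => h f (List.mem_cons_of_mem [] hf))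
  | (n :: rest) :: fs =>
    if hc : PySem.Set.contains v n then
      -- node in visited: continue (the iterator has advanced past n)
      runB graph goal (rest :: fs) path v (by
        intro f hf
        rcases List.mem_cons.mp hf with hf | hf
        · exact fun x hx => h (n :: rest) (List.mem_cons_self) x (hf ▸ List.mem_cons_of_mem n hx)
        · exact h f (List.mem_cons_of_mem _ hf))
    else if n = goal then
      some (path.reverse ++ [n])
    else
      -- visited.add(node); path.append(node); push node's iterator
      runB graph goal (pvAdj graph n :: rest :: fs) (n :: path) (PySem.Set.add v n) (by
        intro f hf
        rcases List.mem_cons.mp hf with hf | hf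
        · exact fun x hx => pvAdj_sub graph n x (hf ▸ hx)
        · rcases List.mem_cons.mp hf with hf' | hf'
          · exact fun x hx => h (n :: rest) (List.mem_cons_self) x (hf' ▸ List.mem_cons_of_mem n hx)
          · exact h f (List.mem_cons_of_mem _ hf'))
termination_by (pvM graph v, (stack.map (fun f => f.length + 1)).sum)
decreasing_by
  · exact Prod.Lex.right _ (by simp only [List.map_cons, List.sum_cons]; omega)
  · exact Prod.Lex.right _ (by simp only [List.map_cons, List.sum_cons, List.length_cons]; omega)
  · apply Prod.Lex.left
    exact pvM_add_lt (h (n :: rest) (List.mem_cons_self) n (List.mem_cons_self))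
      (fun hm => hc ((PySem.Set.contains_iff v n).mpr hm))

def dfs_alt (graph : List (String × List String)) (start : String) (goal : String)
    (visited : Option (List String)) : Option (List String) :=
  let v0 : PySem.Set String := match visited with
    | none => PySem.Set.empty
    | some l => PySem.Set.ofList l
  if start = goal then some [start]
  else
    runB graph goal [pvAdj graph start] [start] (PySem.Set.add v0 start)
      (by intro f hf x hx
          rcases List.mem_cons.mp hf with hf | hf
          · exact pvAdj_sub graph start x (hf ▸ hx)
          · simp at hf)

-- ===== PRECONDITION & SPEC =====
def Spec_dfs (graph : List (String × List String)) (start : String) (goal : String) (visited : Option (List String)) (out : Option (List String)) : Prop := out = dfs_alt graph start goal visited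
instance (graph : List (String × List String)) (start : String) (goal : String) (visited : Option (List String)) (out : Option (List String)) : Decidable (Spec_dfs graph start goal visited out) := by unfold Spec_dfs; infer_instance

-- ===== CLAIM (what is proved, stated in full; the proofs are below) =====
def Claim_equal_dfs : Prop := ∀ (graph : List (String × List String)) (start : String) (goal : String) (visited : Option (List String)), Dom_dfs graph start goal visited → Spec_dfs graph start goal visited (dfs graph start goal visited)

-- ===== LEMMAS AND PROOFS =====

-- A's loop over ns without the `start ::` prefix on a found path (proof-side only)
def loopGo (graph : List (String × List String)) (goal : String) :
    List String → PySem.Set String → Option (List String) × PySem.Set String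
  | [], v => (none, v)
  | n :: rest, v =>
    if PySem.Set.contains v n then loopGo graph goal rest v
    else
      match (dfsRec graph n goal v).val with
      | (some p, v') => if p = [] then loopGo graph goal rest v' else (some p, v')
      | (none, v') => loopGo graph goal rest v'

-- A's pending loops, frame by frame, as B's stack sees them (proof-side only)
def chain (graph : List (String × List String)) (goal : String) :
    List (List String) → List String → PySem.Set String → Option (List String)
  | [], _, _ => none
  | f :: fs, pl, v =>
    match loopGo graph goal f v with
    | (some p, _) => some (pl.reverse ++ p)
    | (none, v') => chain graph goal fs pl.tail v'

theorem dfsLoop_eq_loopGo (graph : List (String × List String)) (start goal : String) :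
    ∀ (ns : List String) (h : ∀ x ∈ ns, x ∈ pvUniv graph) (v : PySem.Set String),
      (dfsLoop graph start goal ns h v).val =
        (match loopGo graph goal ns v with
         | (some p, v') => (some (start :: p), v')
         | (none, v') => (none, v')) := by
  intro ns
  induction ns with
  | nil => intro h v; rw [dfsLoop.eq_def]; rfl
  | cons n rest ih =>
    intro h v
    rw [dfsLoop.eq_def]
    simp only [loopGo]
    by_cases hc : PySem.Set.contains v n
    · simp only [hc, dif_pos, if_pos, ih]
    · simp only [hc, dif_neg, if_neg, Bool.false_eq_true, not_false_iff]
      split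
      next p v' heq =>
        simp only [heq]
        by_cases hp : p = [] <;> simp [hp, ih]
      next v' heq =>
        simp only [heq]
        simp [ih]

theorem dfsRec_eq_loopGo (graph : List (String × List String)) (n goal : String)
    (v : PySem.Set String) (hng : n ≠ goal) :
    (dfsRec graph n goal v).val =
      (match loopGo graph goal (pvAdj graph n) (PySem.Set.add v n) with
       | (some p, v') => (some (n :: p), v')
       | (none, v') => (none, v')) := by
  rw [dfsRec.eq_def]
  simp only [hng, dif_neg, not_false_iff]
  exact dfsLoop_eq_loopGo graph n goal (pvAdj graph n) (pvAdj_sub graph n) (PySem.Set.add v n)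

theorem runB_eq_chain (graph : List (String × List String)) (goal : String) :
    ∀ (stack : List (List String)) (path : List String) (v : PySem.Set String)
      (h : ∀ f ∈ stack, ∀ x ∈ f, x ∈ pvUniv graph),
      runB graph goal stack path v h = chain graph goal stack path v := by
  intro stack path v h
  induction stack, path, v, h using runB.induct graph goal with
  | case1 path v h _ =>
    rw [runB.eq_def]
    rfl
  | case2 path v fs h _ ih =>
    rw [runB.eq_def]
    exact ih.trans (by rfl)
  | case3 path v n rest fs h hc _ ih =>
    rw [runB.eq_def]
    simp only [dif_pos hc]
    rw [ih]
    simp [chain, loopGo, (PySem.Set.contains_iff v n).mp hc]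
  | case4 path v rest fs h hc _ =>
    rw [runB.eq_def]
    simp only [dif_neg hc]
    simp only [chain, loopGo, pvContains_eq_false (fun hm => hc ((PySem.Set.contains_iff v goal).mpr hm))]
    rw [dfsRec.eq_def]
    simp
  | case5 path v n rest fs h hc hg _ ih =>
    rw [runB.eq_def]
    simp only [dif_neg hc, if_neg hg]
    rw [ih]
    -- both sides: expand the head frame of each chain
    simp only [chain, loopGo, hc, Bool.false_eq_true, if_neg, not_false_iff]
    rw [dfsRec_eq_loopGo graph n goal v hg]
    rcases hlg : loopGo graph goal (pvAdj graph n) (PySem.Set.add v n) with ⟨_ | p, v2⟩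
    · simp
    · simp

theorem dfs_core (graph : List (String × List String)) (start goal : String)
    (v0 : PySem.Set String) :
    (dfsRec graph start goal v0).val.1 =
      (if _hg : start = goal then some [start]
       else runB graph goal [pvAdj graph start] [start] (PySem.Set.add v0 start)
        (by intro f hf x hx
            rcases List.mem_cons.mp hf with hf | hf
            · exact pvAdj_sub graph start x (hf ▸ hx)
            · simp at hf)) := by
  by_cases hg : start = goal
  · subst hg
    rw [dfsRec.eq_def]
    simp
  · simp only [dif_neg hg]
    rw [dfsRec_eq_loopGo graph start goal v0 hg, runB_eq_chain]
    rcases hlg : loopGo graph goal (pvAdj graph start) (PySem.Set.add v0 start) with ⟨_ | p, v2⟩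
    · simp [chain, hlg]
    · simp [chain, hlg]

-- ===== VERDICT (by name: the statement is the Claim_ definition above) =====
theorem dfs_spec : Claim_equal_dfs := by
  intro graph start goal visited _
  unfold Spec_dfs dfs dfs_alt
  cases visited with
  | none => exact dfs_core graph start goal PySem.Set.empty
  | some l => exact dfs_core graph start goal (PySem.Set.ofList l)
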